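-- pv_equiv track=rewrite | github.com/sametkenar/PythonExercises | Error_Handling_and_Debugging/Ball_Game.py | ball_game
-- ===== SOURCE A (Python) =====
-- def ball_game(list_of_children, number_of_turns):
--     t = 0
--     i = 0
--     while t < number_of_turns:
--         try:
--             i = list_of_children[i]
--         except IndexError:
--             break
--         t += 1
--     return i
-- ===== SOURCE B (Python) =====
-- def ball_game(list_of_children, number_of_turns):
--     # Cycle detection: record each visited position's step; on a repeat, jump
--     # modularly to the final position instead of replaying every turn.
--     if number_of_turns <= 0:
--         return 0
--     n = len(list_of_children)
--     seen = {0: 0}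
--     path = [0]
--     i = 0
--     t = 0
--     while t < number_of_turns:
--         if not (-n <= i < n):
--             return i
--         j = list_of_children[i]
--         t += 1
--         if j in seen:
--             start = seen[j]
--             cycle_len = t - start
--             return path[start + (number_of_turns - start) % cycle_len]
--         seen[j] = t
--         path.append(j)
--         i = j
--     return i
-- ===== Notes on version B (the rewrite author's own statement) =====
-- stated objective: alternative
-- what changed: Replaces the turn-by-turn simulation (one list lookup per turn) by cycle detection with a visited map and path list, then a single modular jump to the final position.
import Mathlib
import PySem

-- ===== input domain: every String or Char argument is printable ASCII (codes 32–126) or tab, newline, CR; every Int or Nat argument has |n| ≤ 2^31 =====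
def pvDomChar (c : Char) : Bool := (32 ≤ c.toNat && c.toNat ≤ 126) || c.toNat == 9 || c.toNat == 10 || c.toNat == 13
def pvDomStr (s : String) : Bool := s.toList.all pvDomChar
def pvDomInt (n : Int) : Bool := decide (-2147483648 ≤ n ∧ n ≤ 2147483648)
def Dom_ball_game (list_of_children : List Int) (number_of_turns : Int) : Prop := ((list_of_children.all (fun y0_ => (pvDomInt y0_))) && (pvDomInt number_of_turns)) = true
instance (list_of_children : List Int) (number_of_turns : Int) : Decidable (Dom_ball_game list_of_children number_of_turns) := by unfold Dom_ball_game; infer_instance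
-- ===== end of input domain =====

-- B replaces A's turn-by-turn simulation by cycle detection (visited map +
-- path list) and a single modular jump to the final position: objective "alternative".

-- ===== PORT A =====
-- A's while loop: t counts from 0 up to number_of_turns; the loop body runs
-- max(number_of_turns, 0) times unless an IndexError (pyGet? = none) breaks out.
def ballLoopA (xs : List Int) (fuel : Nat) (i : Int) : Int :=
  match fuel with
  | 0 => i
  | f + 1 =>
    match PySem.List.pyGet? xs i with
    | none => i
    | some v => ballLoopA xs f v

def ball_game (list_of_children : List Int) (number_of_turns : Int) : Int :=
  ballLoopA list_of_children number_of_turns.toNat 0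

-- ===== PORT B =====
-- Source B's while loop; t is the number of turns already played, fuel = N - t.
-- `list_of_children[i]` in Source B is guarded by the range check, so pyGet? is
-- `some` there and `.getD 0` is exact; likewise path[start+rem] is in range.
def ballLoopB (xs : List Int) (N : Int) (fuel : Nat) (t i : Int)
    (seen : PySem.Dict Int Int) (path : List Int) : Int :=
  match fuel with
  | 0 => i
  | f + 1 =>
    if ¬ (-(xs.length : Int) ≤ i ∧ i < (xs.length : Int)) then i
    else
      let j := (PySem.List.pyGet? xs i).getD 0
      match seen.get? j with
      | some start =>
          (PySem.List.pyGet? path (start + PySem.Int.mod (N - start) (t + 1 - start))).getD 0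
      | none => ballLoopB xs N f (t + 1) j (seen.insert j (t + 1)) (path ++ [j])

def ball_game_alt (list_of_children : List Int) (number_of_turns : Int) : Int :=
  if number_of_turns ≤ 0 then 0
  else ballLoopB list_of_children number_of_turns number_of_turns.toNat 0 0
    (PySem.Dict.empty.insert 0 0) [0]

-- ===== PRECONDITION & SPEC =====
def Spec_ball_game (list_of_children : List Int) (number_of_turns : Int) (out : Int) : Prop := out = ball_game_alt list_of_children number_of_turns
instance (list_of_children : List Int) (number_of_turns : Int) (out : Int) : Decidable (Spec_ball_game list_of_children number_of_turns out) := by unfold Spec_ball_game; infer_instance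

-- ===== CLAIM (what is proved, stated in full; the proofs are below) =====
def Claim_equal_ball_game : Prop := ∀ (list_of_children : List Int) (number_of_turns : Int), Dom_ball_game list_of_children number_of_turns → Spec_ball_game list_of_children number_of_turns (ball_game list_of_children number_of_turns)

-- ===== LEMMAS AND PROOFS =====

-- one step of the game, with out-of-range positions as fixed points
def gstep (xs : List Int) (i : Int) : Int := (PySem.List.pyGet? xs i).getD i

lemma ballLoopA_eq_iterate (xs : List Int) :
    ∀ (fuel : Nat) (i : Int), ballLoopA xs fuel i = (gstep xs)^[fuel] i := by
  intro fuel
  induction fuel with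
  | zero => intro i; simp [ballLoopA]
  | succ f ih =>
    intro i
    cases h : PySem.List.pyGet? xs i with
    | none =>
      have hfix : gstep xs i = i := by simp [gstep, h]
      simp [ballLoopA, h, Function.iterate_fixed hfix]
    | some v =>
      have hv : gstep xs i = v := by simp [gstep, h]
      simp [ballLoopA, h, ih, Function.iterate_succ_apply, hv]

lemma iter_period {f : Int → Int} {a : Int} {s p : Nat} (hp : 0 < p)
    (h : f^[s + p] a = f^[s] a) :
    ∀ k : Nat, f^[s + k] a = f^[s + k % p] a := by
  intro k
  induction k using Nat.strong_induction_on with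
  | _ k ih =>
    by_cases hk : k < p
    · rw [Nat.mod_eq_of_lt hk]
    · push_neg at hk
      have h1 : s + k = (k - p) + (s + p) := by omega
      rw [h1, Function.iterate_add_apply, h, ← Function.iterate_add_apply]
      have h2 : (k - p) + s = s + (k - p) := by omega
      rw [h2, ih (k - p) (by omega)]
      have h3 : k % p = (k - p) % p := by
        conv_lhs => rw [show k = (k - p) + p by omega]
        rw [Nat.add_mod_right]
      rw [h3]

lemma ballLoopB_correct (xs : List Int) (N : Int) :
    ∀ (fuel : Nat) (t i : Int) (seen : PySem.Dict Int Int) (path : List Int),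
      0 ≤ t → t + fuel = N →
      i = (gstep xs)^[t.toNat] 0 →
      (∀ k : Nat, k ≤ t.toNat → path[k]? = some ((gstep xs)^[k] 0)) →
      path.length = t.toNat + 1 →
      (∀ p s, seen.get? p = some s → 0 ≤ s ∧ s ≤ t ∧ (gstep xs)^[s.toNat] 0 = p) →
      ballLoopB xs N fuel t i seen path = (gstep xs)^[N.toNat] 0 := by
  intro fuel
  induction fuel with
  | zero =>
    intro t i seen path ht hN hi _ _ _
    have : t = N := by omega
    subst this
    simpa [ballLoopB] using hi
  | succ f ih =>
    intro t i seen path ht hN hi hpath hlen hseen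
    have htN : t < N := by omega
    by_cases hrange : ¬ (-(xs.length : Int) ≤ i ∧ i < (xs.length : Int))
    · -- out of range: i is a fixed point of gstep, A would also stay at i
      have hnone : PySem.List.pyGet? xs i = none := by
        rw [PySem.List.pyGet?_eq_none_iff]
        exact fun hc => hrange ⟨hc.1, hc.2⟩
      have hfix : gstep xs i = i := by simp [gstep, hnone]
      have hsplit : N.toNat = (N.toNat - t.toNat) + t.toNat := by omega
      have : (gstep xs)^[N.toNat] 0 = i := by
        rw [hsplit, Function.iterate_add_apply, ← hi, Function.iterate_fixed hfix]
      simp [ballLoopB, hrange, this]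
    · push_neg at hrange
      have hiso : (PySem.List.pyGet? xs i).isSome := by
        rw [Option.isSome_iff_ne_none]
        intro hn
        exact ((PySem.List.pyGet?_eq_none_iff xs i).mp hn) ⟨hrange.1, hrange.2⟩
      obtain ⟨v, hsomev⟩ := Option.isSome_iff_exists.mp hiso
      have hj : (PySem.List.pyGet? xs i).getD 0 = gstep xs i := by simp [gstep, hsomev]
      have hjit : gstep xs i = (gstep xs)^[t.toNat + 1] 0 := by
        rw [Function.iterate_succ_apply', ← hi]
      rw [show ballLoopB xs N (f + 1) t i seen path =
        (if ¬ (-(xs.length : Int) ≤ i ∧ i < (xs.length : Int)) then i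
         else
           match seen.get? ((PySem.List.pyGet? xs i).getD 0) with
           | some start =>
               (PySem.List.pyGet? path (start + PySem.Int.mod (N - start) (t + 1 - start))).getD 0
           | none => ballLoopB xs N f (t + 1) ((PySem.List.pyGet? xs i).getD 0)
               (seen.insert ((PySem.List.pyGet? xs i).getD 0) (t + 1))
               (path ++ [(PySem.List.pyGet? xs i).getD 0])) from rfl]
      rw [if_neg (by push_neg; exact hrange)]
      rw [hj]
      cases hlook : seen.get? (gstep xs i) with
      | some s =>
        change (PySem.List.pyGet? path (s + PySem.Int.mod (N - s) (t + 1 - s))).getD 0 =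
          (gstep xs)^[N.toNat] 0
        obtain ⟨hs0, hst, hsval⟩ := hseen _ _ hlook
        -- period p from step S := s.toNat
        set S := s.toNat with hS
        set T := t.toNat with hT
        have hp : 0 < T + 1 - S := by omega
        have hper : (gstep xs)^[S + (T + 1 - S)] 0 = (gstep xs)^[S] 0 := by
          rw [show S + (T + 1 - S) = T + 1 by omega, hsval, hjit]
        have hmain := iter_period hp hper (N.toNat - S)
        have hNS : S + (N.toNat - S) = N.toNat := by omega
        rw [hNS] at hmain
        -- the returned index equals S + (N.toNat - S) % (T+1-S)
        have hmod : PySem.Int.mod (N - s) (t + 1 - s) =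
            ((N.toNat - S) % (T + 1 - S) : Nat) := by
          rw [PySem.Int.mod_eq_emod_of_pos (by omega)]
          have e1 : N - s = ((N.toNat - S : Nat) : Int) := by omega
          have e2 : t + 1 - s = ((T + 1 - S : Nat) : Int) := by omega
          rw [e1, e2, ← Int.natCast_mod]
        have hidx : s + PySem.Int.mod (N - s) (t + 1 - s) =
            ((S + (N.toNat - S) % (T + 1 - S) : Nat) : Int) := by
          rw [hmod]; push_cast; omega
        have hle : S + (N.toNat - S) % (T + 1 - S) ≤ T := by
          have := Nat.mod_lt (N.toNat - S) hp
          omega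
        rw [hidx, PySem.List.pyGet?_natCast, hpath _ hle]
        simp [hmain]
      | none =>
        change ballLoopB xs N f (t + 1) (gstep xs i) (seen.insert (gstep xs i) (t + 1))
          (path ++ [gstep xs i]) = (gstep xs)^[N.toNat] 0
        rw [ih (t + 1) (gstep xs i) (seen.insert (gstep xs i) (t + 1)) (path ++ [gstep xs i])
          (by omega) (by omega)
          (by rw [hjit]; congr 1; omega)
          ?_ (by simp [hlen]; omega) ?_]
        · intro k hk
          have hk1 : (t + 1).toNat = t.toNat + 1 := by omega
          rw [hk1] at hk
          rcases Nat.lt_or_ge k (t.toNat + 1) with hlt | hge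
          · rw [List.getElem?_append_left (by omega)]
            exact hpath k (by omega)
          · have hkeq : k = path.length := by omega
            rw [hkeq, List.getElem?_concat_length]
            have hpl : (gstep xs)^[path.length] 0 = gstep xs i := by
              rw [hlen, Function.iterate_succ_apply', ← hi]
            rw [hpl]
        · intro p s hps
          rw [PySem.Dict.get?_insert] at hps
          split_ifs at hps with hpe
          · obtain rfl := Option.some_inj.mp hps
            subst hpe
            exact ⟨by omega, le_rfl,
              by rw [show (t + 1).toNat = t.toNat + 1 by omega, ← hjit]⟩
          · obtain ⟨a1, a2, a3⟩ := hseen _ _ hps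
            exact ⟨a1, by omega, a3⟩

-- ===== VERDICT (by name: the statement is the Claim_ definition above) =====
theorem ball_game_spec : Claim_equal_ball_game := by
  intro xs N _
  unfold Spec_ball_game ball_game ball_game_alt
  rw [ballLoopA_eq_iterate]
  by_cases hN : N ≤ 0
  · rw [if_pos hN]
    rw [show N.toNat = 0 by omega]
    simp
  · rw [if_neg hN]
    rw [ballLoopB_correct xs N N.toNat 0 0 (PySem.Dict.empty.insert 0 0) [0]
      le_rfl (by omega) (by simp)
      (by intro k hk; rw [show (0 : Int).toNat = 0 from rfl, Nat.le_zero] at hk; subst hk; simp)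
      (by simp)
      (by
        intro p s hps
        rw [PySem.Dict.get?_insert] at hps
        split_ifs at hps with hpe
        · obtain rfl := Option.some_inj.mp hps
          subst hpe
          exact ⟨le_rfl, le_rfl, by simp⟩
        · simp [PySem.Dict.get?_empty] at hps)]
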